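-- pv_equiv track=rewrite | github.com/chaeyoungeee/One-Week-Five-Solve | 프로그래머스/3/258707. n ＋ 1 카드게임/n ＋ 1 카드게임.py | solution
-- ===== SOURCE A (Python) =====
-- from itertools import combinations as cb
--
-- def solution(coin, cards):
--     answer = 1
--     n = len(cards)
--
--     init = cards[:n//3]
--     idx = 2
--
--     case = list(cb(init, 2))
--     cnt = 0
--     for i in case:
--         if sum(i) == n + 1:
--             cnt += 1
--
--     double = []
--     while idx <= n-n//3:
--         pick = cards[n//3:n//3+idx]
--
--         tcase = list(cb(pick, 2))
--         for i in tcase: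
--             if sum(i) == n + 1:
--                 double.append(i)
--
--         if coin > 0 :
--             if n+1 - pick[-1] in init:
--                 cnt += 1
--                 coin -= 1
--
--         if coin > 0 :
--             if n+1 - pick[-2] in init:
--                 cnt += 1
--                 coin -= 1
--
--         if cnt == 0 :
--             if coin >= 2 and len(double) > 0:
--                 coin -= 2
--                 double.pop()
--                 cnt += 1
--             else :
--                 break
--         cnt -= 1
--         idx += 2
--         answer += 1
--     return answer
-- ===== SOURCE B (Python) =====
-- def solution(coin, cards):
--     n = len(cards)
--     target = n + 1
--     k = n // 3
--     init = cards[:k]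
--     init_set = set(init)
--
--     # pairs within the initial hand, counted in one pass with a frequency dict
--     freq = {}
--     cnt = 0
--     for c in init:
--         cnt += freq.get(target - c, 0)
--         freq[c] = freq.get(c, 0) + 1
--
--     answer = 1
--     pick_freq = {}     # frequencies of drawn cards so far
--     pair_prefix = 0    # number of pairs summing to target among drawn cards
--     double_len = 0     # mirrors len(double) in the naive version
--     idx = 2
--     while idx <= n - k:
--         c1 = cards[k + idx - 2]
--         c2 = cards[k + idx - 1]
--         pair_prefix += pick_freq.get(target - c1, 0)
--         pick_freq[c1] = pick_freq.get(c1, 0) + 1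
--         pair_prefix += pick_freq.get(target - c2, 0)
--         pick_freq[c2] = pick_freq.get(c2, 0) + 1
--         double_len += pair_prefix
--
--         if coin > 0 and (target - c2) in init_set:
--             cnt += 1
--             coin -= 1
--         if coin > 0 and (target - c1) in init_set:
--             cnt += 1
--             coin -= 1
--
--         if cnt == 0:
--             if coin >= 2 and double_len > 0:
--                 coin -= 2
--                 double_len -= 1
--                 cnt += 1
--             else:
--                 break
--         cnt -= 1
--         idx += 2
--         answer += 1
--     return answer
-- ===== Notes on version B (the rewrite author's own statement) =====
-- stated objective: faster
-- what changed: Replaces the per-round recomputation of all combinations(pick,2) and the growing 'double' list by an incremental frequency dict (new pairs = freq[n+1-c] per drawn card), a running pair counter standing in for len(double), and a set for the init-membership tests, so each round costs O(1) amortized instead of O(n^2).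
import Mathlib
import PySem

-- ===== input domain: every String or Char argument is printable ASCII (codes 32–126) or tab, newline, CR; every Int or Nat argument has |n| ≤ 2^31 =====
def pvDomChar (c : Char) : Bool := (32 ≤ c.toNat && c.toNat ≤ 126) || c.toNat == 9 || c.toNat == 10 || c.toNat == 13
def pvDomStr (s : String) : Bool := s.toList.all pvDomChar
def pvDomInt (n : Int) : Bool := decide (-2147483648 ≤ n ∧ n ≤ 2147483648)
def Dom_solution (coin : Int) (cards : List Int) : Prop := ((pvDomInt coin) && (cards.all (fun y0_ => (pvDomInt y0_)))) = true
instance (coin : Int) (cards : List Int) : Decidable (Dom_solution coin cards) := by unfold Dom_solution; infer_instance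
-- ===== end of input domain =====

-- B replaces A's per-round recomputation of combinations(pick,2) and the 'double' list by an
-- incremental frequency dict, a running pair counter and a set: asymptotically faster, same value.

-- ===== PORT A =====
-- itertools.combinations(l, 2) in Python's order of index pairs
def combos2 (l : List Int) : List (Int × Int) :=
  match l with
  | [] => []
  | x :: xs => xs.map (fun y => (x, y)) ++ combos2 xs

-- A's while loop; pick[-1]/pick[-2] use pyGet? with a .getD 0 totality guard
-- (in range whenever the loop guard holds: pick has length idx ≥ 2 there)
-- fuel = cards.length + 1 bounds the iteration count (idx grows by 2 up to n - n//3);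
-- it is a totality guard only, never reached with the fuel solution passes
def loopA (n k : Int) (cards init : List Int) :
    Nat → Int → Int → Int → List (Int × Int) → Int → Int
  | 0, _, _, _, _, answer => answer
  | fuel+1, coin, cnt, idx, double, answer =>
    if idx ≤ n - k then
      let pick := PySem.List.slice cards (some k) (some (k + idx))
      let double1 := double ++ (combos2 pick).filter (fun p => p.1 + p.2 == n + 1)
      let last1 := (PySem.List.pyGet? pick (-1)).getD 0
      let s1 := if coin > 0 then
          (if init.contains (n + 1 - last1) then (cnt + 1, coin - 1) else (cnt, coin))
        else (cnt, coin)
      let last2 := (PySem.List.pyGet? pick (-2)).getD 0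
      let s2 := if s1.2 > 0 then
          (if init.contains (n + 1 - last2) then (s1.1 + 1, s1.2 - 1) else s1)
        else s1
      if s2.1 = 0 then
        if s2.2 ≥ 2 ∧ double1.length > 0 then
          loopA n k cards init fuel (s2.2 - 2) (s2.1 + 1 - 1) (idx + 2) double1.dropLast (answer + 1)
        else answer
      else loopA n k cards init fuel s2.2 (s2.1 - 1) (idx + 2) double1 (answer + 1)
    else answer

def solution (coin : Int) (cards : List Int) : Int :=
  let n : Int := cards.length
  let k : Int := PySem.Int.floordiv n 3
  let init := PySem.List.slice cards none (some k)
  let cnt : Int := ((combos2 init).countP (fun p => p.1 + p.2 == n + 1) : Int)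
  loopA n k cards init (cards.length + 1) coin cnt 2 [] 1

-- ===== PORT B =====
-- B's while loop: freq = pick_freq, pairPrefix/doubleLen the two counters; direct indexing
-- cards[k+idx-2] / cards[k+idx-1] via pyGet? with a .getD 0 totality guard (in range under the guard)
-- same fuel guard as loopA
def loopB (n k : Int) (cards : List Int) (initSet : PySem.Set Int) :
    Nat → Int → Int → Int → PySem.Dict Int Int → Int → Int → Int → Int
  | 0, _, _, _, _, _, _, answer => answer
  | fuel+1, coin, cnt, idx, freq, pairPrefix, doubleLen, answer =>
    if idx ≤ n - k then
    let c1 := (PySem.List.pyGet? cards (k + idx - 2)).getD 0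
    let c2 := (PySem.List.pyGet? cards (k + idx - 1)).getD 0
    let pp1 := pairPrefix + freq.getD (n + 1 - c1) 0
    let freq1 := freq.insert c1 (freq.getD c1 0 + 1)
    let pp2 := pp1 + freq1.getD (n + 1 - c2) 0
    let freq2 := freq1.insert c2 (freq1.getD c2 0 + 1)
    let dl1 := doubleLen + pp2
    let s1 := if coin > 0 ∧ PySem.Set.contains initSet (n + 1 - c2) then (cnt + 1, coin - 1) else (cnt, coin)
    let s2 := if s1.2 > 0 ∧ PySem.Set.contains initSet (n + 1 - c1) then (s1.1 + 1, s1.2 - 1) else s1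
    if s2.1 = 0 then
      if s2.2 ≥ 2 ∧ dl1 > 0 then
        loopB n k cards initSet fuel (s2.2 - 2) (s2.1 + 1 - 1) (idx + 2) freq2 pp2 (dl1 - 1) (answer + 1)
      else answer
    else loopB n k cards initSet fuel s2.2 (s2.1 - 1) (idx + 2) freq2 pp2 dl1 (answer + 1)
  else answer

def solution_alt (coin : Int) (cards : List Int) : Int :=
  let n : Int := cards.length
  let k : Int := PySem.Int.floordiv n 3
  let init := PySem.List.slice cards none (some k)
  let initSet := PySem.Set.ofList init
  -- one pass over init building the frequency dict and the pair count
  let fc := init.foldl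
    (fun (s : PySem.Dict Int Int × Int) c =>
      (s.1.insert c (s.1.getD c 0 + 1), s.2 + s.1.getD (n + 1 - c) 0))
    (PySem.Dict.empty, 0)
  loopB n k cards initSet (cards.length + 1) coin fc.2 2 PySem.Dict.empty 0 0 1

-- ===== PRECONDITION & SPEC =====
def Spec_solution (coin : Int) (cards : List Int) (out : Int) : Prop := out = solution_alt coin cards
instance (coin : Int) (cards : List Int) (out : Int) : Decidable (Spec_solution coin cards out) := by unfold Spec_solution; infer_instance

-- ===== CLAIM (what is proved, stated in full; the proofs are below) =====
def Claim_equal_solution : Prop := ∀ (coin : Int) (cards : List Int), Dom_solution coin cards → Spec_solution coin cards (solution coin cards)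

-- ===== LEMMAS AND PROOFS =====

-- number of pairs (i < j) with l[i] + l[j] = t, as A counts them
def pairCount (t : Int) (l : List Int) : Nat :=
  (combos2 l).countP (fun p => p.1 + p.2 == t)

theorem pairCount_append (t c : Int) (l : List Int) :
    pairCount t (l ++ [c]) = pairCount t l + l.count (t - c) := by
  induction l with
  | nil => simp [pairCount, combos2]
  | cons x xs ih =>
    simp only [pairCount, combos2, List.cons_append, List.countP_append, List.countP_map,
      List.count_cons] at *
    have hmap : ∀ (ys : List Int), List.countP ((fun p => p.1 + p.2 == t) ∘ fun y => (x, y)) ys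
        = List.countP (fun y => x + y == t) ys := by
      intro ys; apply List.countP_congr; intro y _; simp
    rw [hmap, hmap] at *
    have hone : List.countP (fun y => x + y == t) [c] = if x = t - c then 1 else 0 := by
      by_cases hxc : x = t - c
      · simp [List.countP, List.countP.go, hxc]
      · have hxt : (x + c == t) = false := by simp; omega
        simp [List.countP, List.countP.go, hxc, hxt]
    rw [hone, ih]
    by_cases hxc : x = t - c <;> simp [hxc] <;> omega

theorem take_add_two {α : Type} (d : List α) (m : Nat) (h : m + 2 ≤ d.length) :
    d.take (m+2) = d.take m ++ [d[m], d[m+1]] := by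
  have h2 : List.drop m d = d[m] :: d[m+1] :: List.drop (m+1+1) d := by
    rw [List.drop_eq_getElem_cons (show m < d.length by omega),
        List.drop_eq_getElem_cons (show m+1 < d.length by omega)]
    rfl
  rw [List.take_add, h2]
  rfl

theorem counter_insert (freq : PySem.Dict Int Int) (prev : List Int) (c : Int)
    (hf : ∀ v, freq.getD v 0 = (prev.count v : Int)) :
    ∀ v, (freq.insert c (freq.getD c 0 + 1)).getD v 0 = ((prev ++ [c]).count v : Int) := by
  intro v
  rw [PySem.Dict.getD_insert]
  by_cases hv : v = c
  · subst hv; simp [List.count_append, hf v]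
  · have hv' : ¬ c = v := fun h => hv h.symm
    simp [hv, hv', List.count_append, hf v]

theorem contains_ofList (l : List Int) (x : Int) :
    (PySem.Set.ofList l).contains x = l.contains x := by
  simp only [PySem.Set.contains]
  simp

theorem if_and_pair (c : Prop) [Decidable c] (b : Bool) (x y : Int × Int) :
    (if c then (if b then x else y) else y) = (if c ∧ b = true then x else y) := by
  by_cases hc : c <;> by_cases hb : b <;> simp [hc, hb]

set_option maxHeartbeats 2000000 in
theorem loop_eq (n k : Int) (cards init : List Int)
    (hn : n = (cards.length : Int)) (hk0 : 0 ≤ k) :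
    ∀ (m : Nat) (idx coin cnt answer pairPrefix doubleLen : Int)
      (double : List (Int × Int)) (freq : PySem.Dict Int Int),
      2 ≤ idx →
      (∀ v, freq.getD v 0 = (((cards.drop k.toNat).take (idx.toNat - 2)).count v : Int)) →
      pairPrefix = (pairCount (n+1) ((cards.drop k.toNat).take (idx.toNat - 2)) : Int) →
      doubleLen = (double.length : Int) →
      loopA n k cards init m coin cnt idx double answer
        = loopB n k cards (PySem.Set.ofList init) m coin cnt idx freq pairPrefix doubleLen answer := by
  intro m
  induction m with
  | zero =>
    intro idx coin cnt answer pairPrefix doubleLen double freq h2 hf hpp hdl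
    rfl
  | succ m ih =>
    intro idx coin cnt answer pairPrefix doubleLen double freq h2 hf hpp hdl
    rw [loopA, loopB]
    by_cases hg : idx ≤ n - k
    · simp only [dif_pos hg]
      -- abbreviations
      set t : Int := n + 1 with ht
      set d : List Int := cards.drop k.toNat with hd
      set mm : Nat := idx.toNat - 2 with hmm
      have hdlen : d.length = cards.length - k.toNat := by simp [hd]
      have hlen : mm + 2 ≤ d.length := by omega
      have hidx2 : (k + idx).toNat - k.toNat = mm + 2 := by omega
      have hpick : PySem.List.slice cards (some k) (some (k + idx)) = d.take (mm + 2) := by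
        rw [PySem.List.slice_toNat cards hk0 (by omega), hidx2]
      have hc1 : (PySem.List.pyGet? cards (k + idx - 2)).getD 0 = d[mm] := by
        rw [PySem.List.pyGet?_eq_some_getElem cards (by omega) (by omega)]
        have : (k + idx - 2).toNat = k.toNat + mm := by omega
        simp only [this, Option.getD_some, hd]
        rw [List.getElem_drop]
      have hc2 : (PySem.List.pyGet? cards (k + idx - 1)).getD 0 = d[mm+1] := by
        rw [PySem.List.pyGet?_eq_some_getElem cards (by omega) (by omega)]
        have : (k + idx - 1).toNat = k.toNat + (mm+1) := by omega
        simp only [this, Option.getD_some, hd]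
        rw [List.getElem_drop]
      set prev : List Int := d.take mm with hprev
      have hdecomp : d.take (mm + 2) = prev ++ [d[mm], d[mm+1]] := take_add_two d mm hlen
      set c1 : Int := (PySem.List.pyGet? cards (k + idx - 2)).getD 0 with hc1d
      set c2 : Int := (PySem.List.pyGet? cards (k + idx - 1)).getD 0 with hc2d
      have hlenp : prev.length = mm := by simp [hprev]; omega
      have hdecomp2 : d.take (mm + 2) = prev ++ [c1, c2] := by rw [hc1, hc2]; exact hdecomp
      have hassoc2 : prev ++ [c1, c2] = (prev ++ [c1]) ++ [c2] := by simp
      have hlast1 : (PySem.List.pyGet? (d.take (mm + 2)) (-1)).getD 0 = c2 := by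
        rw [hdecomp2, PySem.List.pyGet?_neg_one, hassoc2, List.getLast?_concat]
        rfl
      have hlast2 : (PySem.List.pyGet? (d.take (mm + 2)) (-2)).getD 0 = c1 := by
        rw [hdecomp2]
        rw [PySem.List.pyGet?_neg_ofNat _ 2 (by norm_num) (by simp [hlenp])]
        have hidxm : (prev ++ [c1, c2]).length - 2 = mm := by simp [hlenp]
        rw [hidxm, List.getElem?_append_right (by omega)]
        simp [hlenp]
      have hf1 := counter_insert freq prev c1 hf
      have hf2 := counter_insert _ (prev ++ [c1]) c2 hf1
      have hpc : pairCount t (d.take (mm+2))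
          = pairCount t prev + prev.count (t - c1) + (prev ++ [c1]).count (t - c2) := by
        rw [hdecomp2, hassoc2, pairCount_append, pairCount_append]
      have hfilterlen : ((combos2 (d.take (mm+2))).filter (fun p => p.1 + p.2 == t)).length
          = pairCount t (d.take (mm+2)) := by
        rw [pairCount, List.countP_eq_length_filter]
      have hpp2 : pairPrefix + freq.getD (t - c1) 0
            + (freq.insert c1 (freq.getD c1 0 + 1)).getD (t - c2) 0
          = (pairCount t (d.take (mm+2)) : Int) := by
        rw [hpp, hf (t - c1), hf1 (t - c2), hpc]; push_cast; ring
      have hdl1 : doubleLen + (pairPrefix + freq.getD (t - c1) 0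
            + (freq.insert c1 (freq.getD c1 0 + 1)).getD (t - c2) 0)
          = ((double ++ (combos2 (d.take (mm+2))).filter (fun p => p.1 + p.2 == t)).length : Int) := by
        rw [hpp2, hdl]; simp [hfilterlen]
      have h24 : (idx + 2).toNat - 2 = mm + 2 := by omega
      have hfX : ∀ v, ((freq.insert c1 (freq.getD c1 0 + 1)).insert c2
            ((freq.insert c1 (freq.getD c1 0 + 1)).getD c2 0 + 1)).getD v 0
          = ((d.take ((idx + 2).toNat - 2)).count v : Int) := by
        intro v
        rw [h24, hdecomp2, hassoc2]
        exact hf2 v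
      have hppX : pairPrefix + freq.getD (t - c1) 0
            + (freq.insert c1 (freq.getD c1 0 + 1)).getD (t - c2) 0
          = (pairCount t (d.take ((idx + 2).toNat - 2)) : Int) := by rw [h24]; exact hpp2
      simp only [hpick, contains_ofList, if_and_pair]
      simp only [hlast1, hlast2, hdl1, gt_iff_lt, Int.natCast_pos]
      rw [hppX]
      generalize hD : double ++ List.filter (fun p => p.1 + p.2 == t) (combos2 (List.take (mm + 2) d)) = D
      generalize hF : (freq.insert c1 (freq.getD c1 0 + 1)).insert c2
          ((freq.insert c1 (freq.getD c1 0 + 1)).getD c2 0 + 1) = F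
      rw [hF] at hfX
      generalize hs1 : (if 0 < coin ∧ init.contains (t - c2) = true then (cnt + 1, coin - 1)
          else (cnt, coin)) = s1
      generalize hs2 : (if 0 < s1.2 ∧ init.contains (t - c1) = true then (s1.1 + 1, s1.2 - 1)
          else s1) = s2
      obtain ⟨cnt2, coin2⟩ := s2
      split_ifs with h1 h2
      · exact ih _ _ _ _ _ _ _ _ (by omega) hfX rfl
          (by rw [List.length_dropLast]; omega)
      · rfl
      · exact ih _ _ _ _ _ _ _ _ (by omega) hfX rfl rfl
    · simp [hg]

theorem init_fold (t : Int) (l : List Int) :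
    (∀ v, (l.foldl (fun (s : PySem.Dict Int Int × Int) c =>
        (s.1.insert c (s.1.getD c 0 + 1), s.2 + s.1.getD (t - c) 0))
        (PySem.Dict.empty, (0:Int))).1.getD v 0 = (l.count v : Int)) ∧
    (l.foldl (fun (s : PySem.Dict Int Int × Int) c =>
        (s.1.insert c (s.1.getD c 0 + 1), s.2 + s.1.getD (t - c) 0))
        (PySem.Dict.empty, (0:Int))).2 = (pairCount t l : Int) := by
  induction l using List.reverseRecOn with
  | nil => exact ⟨fun v => by simp [PySem.Dict.getD_empty], by simp [pairCount, combos2]⟩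
  | append_singleton l c ih =>
    rw [List.foldl_append]
    refine ⟨counter_insert _ l c ih.1, ?_⟩
    simp only [List.foldl_cons, List.foldl_nil]
    rw [ih.2, ih.1 (t - c), pairCount_append]
    push_cast
    ring

-- ===== VERDICT (by name: the statement is the Claim_ definition above) =====
theorem solution_spec : Claim_equal_solution := by
  intro coin cards _
  unfold Spec_solution solution solution_alt
  dsimp only
  set n : Int := (cards.length : Int) with hn
  set k : Int := PySem.Int.floordiv n 3 with hkdef
  set init := PySem.List.slice cards none (some k) with hinit
  have hk0 : 0 ≤ k := by
    rw [hkdef]; unfold PySem.Int.floordiv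
    exact Int.fdiv_nonneg (by rw [hn]; positivity) (by norm_num)
  rw [(init_fold (n+1) init).2]
  exact loop_eq n k cards init hn hk0 (cards.length + 1) 2 coin _ 1 _ _ [] PySem.Dict.empty
    (by omega)
    (fun v => by norm_num [PySem.Dict.getD_empty])
    (by norm_num [pairCount, combos2])
    (by simp)
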